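-- pv_equiv track=rewrite | github.com/LauraPerezLiens/COSMIC_Recurrent_Mutation_Finder | cosmic_classification_explorer.py | summarize_columns_for_help
-- ===== SOURCE A (Python) =====
-- from collections import Counter, defaultdict
-- from typing import Dict, List, Optional, Set, TextIO, Tuple
--
-- HELP_SKIP_COLUMNS = {
--     "COSMIC_PHENOTYPE_ID",
--     "NCI_CODE",
--     "EFO",
-- }
--
-- def norm(x: Optional[str]) -> str:
--     """
--     Normalize a cell value by stripping whitespace.
--     """
--     return (x or "").strip()
--
-- def summarize_columns_for_help(
--     rows: List[Dict[str, str]],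
--     fieldnames: List[str],
--     include_ns_in_help: bool = False,
--     max_unique_to_show_all: int = 20,
--     top_n_large: int = 8,
-- ) -> str:
--     """
--     Build a compact help summary for each useful column.
--     """
--     lines = []
--     lines.append("Available columns and example filter values:")
--
--     for col in fieldnames:
--         if col in HELP_SKIP_COLUMNS:
--             continue
--
--         counter = Counter()
--
--         for row in rows:
--             value = norm(row.get(col))
--             if not include_ns_in_help and value in {"", "NS"}:
--                 continue
--             counter[value] += 1
--
--         n_unique = len(counter)
--
--         if n_unique == 0:
--             lines.append(f"  - {col}: no non-empty values")
--             continue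
--
--         if n_unique <= max_unique_to_show_all:
--             values = ", ".join(
--                 f"{repr(v)} ({counter[v]})"
--                 for v in sorted(counter.keys())
--             )
--             lines.append(f"  - {col}: {values}")
--         else:
--             top_values = ", ".join(
--                 f"{repr(v)} ({c})"
--                 for v, c in counter.most_common(top_n_large)
--             )
--             lines.append(
--                 f"  - {col}: {n_unique} unique values; top values: {top_values}"
--             )
--
--     return "\n".join(lines)
-- ===== SOURCE B (Python) =====
-- from collections import Counter, defaultdict
-- from typing import Dict, List, Optional
--
-- HELP_SKIP_COLUMNS = {
--     "COSMIC_PHENOTYPE_ID",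
--     "NCI_CODE",
--     "EFO",
-- }
--
-- def norm(x: Optional[str]) -> str:
--     return (x or "").strip()
--
-- def summarize_columns_for_help(
--     rows: List[Dict[str, str]],
--     fieldnames: List[str],
--     include_ns_in_help: bool = False,
--     max_unique_to_show_all: int = 20,
--     top_n_large: int = 8,
-- ) -> str:
--     # One pass over the rows: accumulate every column's frequency table at once.
--     cols = [c for c in dict.fromkeys(fieldnames) if c not in HELP_SKIP_COLUMNS]
--     tables = defaultdict(Counter)
--     for row in rows:
--         for col in cols:
--             value = norm(row.get(col))
--             if include_ns_in_help or value not in ("", "NS"):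
--                 tables[col][value] += 1
--
--     def describe(col: str) -> str:
--         table = tables.get(col, Counter())
--         if not table:
--             return f"  - {col}: no non-empty values"
--         if len(table) <= max_unique_to_show_all:
--             values = ", ".join(f"{v!r} ({table[v]})" for v in sorted(table))
--             return f"  - {col}: {values}"
--         top_values = ", ".join(
--             f"{v!r} ({c})" for v, c in table.most_common(top_n_large)
--         )
--         return f"  - {col}: {len(table)} unique values; top values: {top_values}"
--
--     return "\n".join(
--         ["Available columns and example filter values:"]
--         + [describe(c) for c in fieldnames if c not in HELP_SKIP_COLUMNS]
--     )
-- ===== Notes on version B (the rewrite author's own statement) =====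
-- stated objective: alternative
-- what changed: B replaces A's per-column rescans of the row list (a fresh Counter built by a full pass over rows for every column) by a single pass over the rows that accumulates all per-column frequency tables in a defaultdict(Counter) over the deduplicated non-skip columns, followed by a separate formatting pass expressed as a comprehension reading the finished tables.
import Mathlib
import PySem

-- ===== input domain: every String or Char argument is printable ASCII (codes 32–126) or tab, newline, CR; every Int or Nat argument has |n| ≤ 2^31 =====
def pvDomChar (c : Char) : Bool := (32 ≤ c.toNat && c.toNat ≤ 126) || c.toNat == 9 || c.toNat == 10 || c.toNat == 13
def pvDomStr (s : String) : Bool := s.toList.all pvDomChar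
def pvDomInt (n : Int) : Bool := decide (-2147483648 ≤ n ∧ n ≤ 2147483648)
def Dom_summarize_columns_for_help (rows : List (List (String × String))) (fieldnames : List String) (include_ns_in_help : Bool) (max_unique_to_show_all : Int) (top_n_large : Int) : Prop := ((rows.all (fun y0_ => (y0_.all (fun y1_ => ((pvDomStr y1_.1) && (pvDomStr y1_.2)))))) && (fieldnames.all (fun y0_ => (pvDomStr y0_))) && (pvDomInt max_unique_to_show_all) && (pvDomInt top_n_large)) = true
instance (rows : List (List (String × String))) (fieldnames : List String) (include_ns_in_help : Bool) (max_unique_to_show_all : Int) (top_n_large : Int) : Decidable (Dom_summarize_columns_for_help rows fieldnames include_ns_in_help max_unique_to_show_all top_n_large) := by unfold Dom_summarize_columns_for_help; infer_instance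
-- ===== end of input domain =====

-- ===== PORT A =====
-- B builds all per-column frequency tables in one pass over the rows (A rescans the rows once per column);
-- the return values are proved equal on the whole domain (objective: alternative decomposition, no speed claim).

-- shared leaf helpers (module-level context of both Pythons): HELP_SKIP_COLUMNS membership, norm, and repr
def isSkipCol (c : String) : Bool :=
  c == "COSMIC_PHENOTYPE_ID" || c == "NCI_CODE" || c == "EFO"

-- norm(x) = (x or "").strip()
def normCell (x : Option String) : String := PySem.Str.strip (x.getD "")

-- Python repr(s), hand-ported (PySem has no repr): exact on the Dom alphabet
-- (printable ASCII plus tab/newline/CR): quote choice, and escapes for \ ' " \t \n \r.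
def pyReprEscChar (q c : Char) : List Char :=
  if c = '\\' then ['\\', '\\']
  else if c = q then ['\\', q]
  else if c = '\t' then ['\\', 't']
  else if c = '\n' then ['\\', 'n']
  else if c = '\r' then ['\\', 'r']
  else [c]

def pyRepr (s : String) : String :=
  let cs := s.toList
  let q : Char := if '\'' ∈ cs ∧ ¬ '"' ∈ cs then '"' else '\''
  String.ofList (q :: (cs.flatMap (pyReprEscChar q) ++ [q]))

-- A's inner loop: the Counter built for one column by a full pass over the rows
-- (Counter[value] += 1 is Dict.modify value 0 (· + 1); row.get(col) is first-match lookup)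
def aCounter (rows : List (List (String × String))) (include_ns_in_help : Bool) (col : String) :
    PySem.Dict String Int :=
  rows.foldl (fun counter row =>
    let value := normCell ((PySem.Dict.mk row).get? col)
    if !include_ns_in_help && (value == "" || value == "NS") then counter
    else counter.modify value 0 (· + 1)) PySem.Dict.empty

def summarize_columns_for_help (rows : List (List (String × String))) (fieldnames : List String) (include_ns_in_help : Bool) (max_unique_to_show_all : Int) (top_n_large : Int) : String :=
  let lines : List String := ["Available columns and example filter values:"]
  let lines := fieldnames.foldl (fun lines col =>
    if isSkipCol col then lines
    else
      let counter := aCounter rows include_ns_in_help col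
      let n_unique := counter.size
      if n_unique = 0 then lines ++ ["  - " ++ col ++ ": no non-empty values"]
      else if (n_unique : Int) ≤ max_unique_to_show_all then
        -- join over sorted(counter.keys()); counter[v] is getD v 0
        let values := PySem.Str.join ", " ((PySem.List.sorted counter.keys (fun v => v) false).map
          (fun v => pyRepr v ++ " (" ++ PySem.Int.toStr (counter.getD v 0) ++ ")"))
        lines ++ ["  - " ++ col ++ ": " ++ values]
      else
        -- counter.most_common(n) = sorted(items, key=count, reverse=True)[:n] (stable; n < 0 gives [])
        let top_values := PySem.Str.join ", " (((PySem.List.sorted counter.items (fun p => p.2) true).take top_n_large.toNat).map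
          (fun p => pyRepr p.1 ++ " (" ++ PySem.Int.toStr p.2 ++ ")"))
        lines ++ ["  - " ++ col ++ ": " ++ PySem.Int.toStr (n_unique : Int) ++ " unique values; top values: " ++ top_values]) lines
  PySem.Str.join "\n" lines

-- ===== PORT B =====
-- B's accumulation pass: one scan of rows, incrementing tables[col][value] for every
-- deduplicated non-skip column (defaultdict(Counter) is a Dict of Dicts with empty defaults)
def bTables (rows : List (List (String × String))) (cols : List String) (include_ns_in_help : Bool) :
    PySem.Dict String (PySem.Dict String Int) :=
  rows.foldl (fun tables row =>
    cols.foldl (fun tables col =>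
      let value := normCell ((PySem.Dict.mk row).get? col)
      if include_ns_in_help || !(value == "" || value == "NS") then
        tables.modify col PySem.Dict.empty (fun t => t.modify value 0 (· + 1))
      else tables) tables) PySem.Dict.empty

-- B's describe(col), reading one finished table
def describeCol (table : PySem.Dict String Int) (col : String) (max_unique_to_show_all top_n_large : Int) : String :=
  if table.size = 0 then "  - " ++ col ++ ": no non-empty values"
  else if (table.size : Int) ≤ max_unique_to_show_all then
    "  - " ++ col ++ ": " ++ PySem.Str.join ", " ((PySem.List.sorted table.keys (fun v => v) false).map
      (fun v => pyRepr v ++ " (" ++ PySem.Int.toStr (table.getD v 0) ++ ")"))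
  else
    "  - " ++ col ++ ": " ++ PySem.Int.toStr (table.size : Int) ++ " unique values; top values: " ++
      PySem.Str.join ", " (((PySem.List.sorted table.items (fun p => p.2) true).take top_n_large.toNat).map
        (fun p => pyRepr p.1 ++ " (" ++ PySem.Int.toStr p.2 ++ ")"))

def summarize_columns_for_help_alt (rows : List (List (String × String))) (fieldnames : List String) (include_ns_in_help : Bool) (max_unique_to_show_all : Int) (top_n_large : Int) : String :=
  -- cols = [c for c in dict.fromkeys(fieldnames) if c not in HELP_SKIP_COLUMNS]
  let cols := (PySem.List.dedup fieldnames).filter (fun c => !isSkipCol c)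
  let tables := bTables rows cols include_ns_in_help
  PySem.Str.join "\n" ("Available columns and example filter values:" ::
    (fieldnames.filter (fun c => !isSkipCol c)).map
      (fun c => describeCol (tables.getD c PySem.Dict.empty) c max_unique_to_show_all top_n_large))

-- ===== PRECONDITION & SPEC =====
def Spec_summarize_columns_for_help (rows : List (List (String × String))) (fieldnames : List String) (include_ns_in_help : Bool) (max_unique_to_show_all : Int) (top_n_large : Int) (out : String) : Prop := out = summarize_columns_for_help_alt rows fieldnames include_ns_in_help max_unique_to_show_all top_n_large
instance (rows : List (List (String × String))) (fieldnames : List String) (include_ns_in_help : Bool) (max_unique_to_show_all : Int) (top_n_large : Int) (out : String) : Decidable (Spec_summarize_columns_for_help rows fieldnames include_ns_in_help max_unique_to_show_all top_n_large out) := by unfold Spec_summarize_columns_for_help; infer_instance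

-- ===== CLAIM (what is proved, stated in full; the proofs are below) =====
def Claim_equal_summarize_columns_for_help : Prop := ∀ (rows : List (List (String × String))) (fieldnames : List String) (include_ns_in_help : Bool) (max_unique_to_show_all : Int) (top_n_large : Int), Dom_summarize_columns_for_help rows fieldnames include_ns_in_help max_unique_to_show_all top_n_large → Spec_summarize_columns_for_help rows fieldnames include_ns_in_help max_unique_to_show_all top_n_large (summarize_columns_for_help rows fieldnames include_ns_in_help max_unique_to_show_all top_n_large)

-- ===== LEMMAS AND PROOFS =====

-- a fold over columns not containing col leaves tables[col] unchanged
lemma bTables_inner_skip (row : List (String × String)) (inc : Bool) (cs : List String)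
    (tabs : PySem.Dict String (PySem.Dict String Int)) (col : String) (h : col ∉ cs) :
    (cs.foldl (fun tables c =>
      let value := normCell ((PySem.Dict.mk row).get? c)
      if inc || !(value == "" || value == "NS") then
        tables.modify c PySem.Dict.empty (fun t => t.modify value 0 (· + 1))
      else tables) tabs).getD col PySem.Dict.empty = tabs.getD col PySem.Dict.empty := by
  induction cs generalizing tabs with
  | nil => rfl
  | cons c cs ih =>
    simp only [List.mem_cons, not_or] at h
    simp only [List.foldl_cons]
    rw [ih _ h.2]
    split
    · exact PySem.Dict.getD_modify_of_ne _ _ _ h.1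
    · rfl

-- one row's inner fold acts on tables[col] exactly as A's Counter step, when col occurs once in cs
lemma bTables_inner_step (row : List (String × String)) (inc : Bool) (cs : List String)
    (tabs : PySem.Dict String (PySem.Dict String Int)) (col : String)
    (hnd : cs.Nodup) (hmem : col ∈ cs) :
    (cs.foldl (fun tables c =>
      let value := normCell ((PySem.Dict.mk row).get? c)
      if inc || !(value == "" || value == "NS") then
        tables.modify c PySem.Dict.empty (fun t => t.modify value 0 (· + 1))
      else tables) tabs).getD col PySem.Dict.empty =
    (let value := normCell ((PySem.Dict.mk row).get? col)
     if !inc && (value == "" || value == "NS") then tabs.getD col PySem.Dict.empty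
     else (tabs.getD col PySem.Dict.empty).modify value 0 (· + 1)) := by
  induction cs generalizing tabs with
  | nil => cases hmem
  | cons c cs ih =>
    rcases List.mem_cons.mp hmem with hc | hc
    · subst hc
      simp only [List.foldl_cons]
      rw [bTables_inner_skip row inc cs _ col (List.nodup_cons.mp hnd).1]
      cases hinc : inc <;>
        cases hv : (normCell ((PySem.Dict.mk row).get? col) == "" ||
                    normCell ((PySem.Dict.mk row).get? col) == "NS") <;>
        simp [PySem.Dict.getD_modify_self]
    · have hne : col ≠ c := by
        rintro rfl; exact (List.nodup_cons.mp hnd).1 hc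
      simp only [List.foldl_cons]
      rw [ih _ (List.nodup_cons.mp hnd).2 hc]
      split
      · rw [PySem.Dict.getD_modify_of_ne _ _ _ hne]
      · rfl

-- over all rows: B's accumulated tables[col] is A's Counter for col
lemma bTables_getD (rows : List (List (String × String))) (inc : Bool) (cs : List String)
    (col : String) (hnd : cs.Nodup) (hmem : col ∈ cs) :
    (bTables rows cs inc).getD col PySem.Dict.empty = aCounter rows inc col := by
  unfold bTables aCounter
  suffices h : ∀ tabs : PySem.Dict String (PySem.Dict String Int),
      (rows.foldl (fun tables row =>
        cs.foldl (fun tables c =>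
          let value := normCell ((PySem.Dict.mk row).get? c)
          if inc || !(value == "" || value == "NS") then
            tables.modify c PySem.Dict.empty (fun t => t.modify value 0 (· + 1))
          else tables) tables) tabs).getD col PySem.Dict.empty =
      rows.foldl (fun counter row =>
        let value := normCell ((PySem.Dict.mk row).get? col)
        if !inc && (value == "" || value == "NS") then counter
        else counter.modify value 0 (· + 1)) (tabs.getD col PySem.Dict.empty) by
    rw [h PySem.Dict.empty]; rfl
  intro tabs
  induction rows generalizing tabs with
  | nil => rfl
  | cons row rows ih =>
    simp only [List.foldl_cons]
    rw [ih, bTables_inner_step row inc cs tabs col hnd hmem]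

-- A's loop body, written as a conditional single append of describeCol applied to A's Counter
lemma aStep_eq (rows : List (List (String × String))) (inc : Bool) (mx tn : Int)
    (acc : List String) (col : String) :
    (if isSkipCol col then acc
     else
      let counter := aCounter rows inc col
      let n_unique := counter.size
      if n_unique = 0 then acc ++ ["  - " ++ col ++ ": no non-empty values"]
      else if (n_unique : Int) ≤ mx then
        let values := PySem.Str.join ", " ((PySem.List.sorted counter.keys (fun v => v) false).map
          (fun v => pyRepr v ++ " (" ++ PySem.Int.toStr (counter.getD v 0) ++ ")"))
        acc ++ ["  - " ++ col ++ ": " ++ values]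
      else
        let top_values := PySem.Str.join ", " (((PySem.List.sorted counter.items (fun p => p.2) true).take tn.toNat).map
          (fun p => pyRepr p.1 ++ " (" ++ PySem.Int.toStr p.2 ++ ")"))
        acc ++ ["  - " ++ col ++ ": " ++ PySem.Int.toStr ((counter.size : Nat) : Int) ++ " unique values; top values: " ++ top_values]) =
    (if (!isSkipCol col) = true then acc ++ [describeCol (aCounter rows inc col) col mx tn] else acc) := by
  cases hs : isSkipCol col <;> simp [describeCol] <;> split_ifs <;> rfl

-- ===== VERDICT (by name: the statement is the Claim_ definition above) =====
theorem summarize_columns_for_help_spec : Claim_equal_summarize_columns_for_help := by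
  intro rows fieldnames inc mx tn _
  unfold Spec_summarize_columns_for_help
  unfold summarize_columns_for_help summarize_columns_for_help_alt
  simp only []
  congr 1
  rw [PySem.List.foldl_congr_mem _ _ _ _ (fun acc col _ => aStep_eq rows inc mx tn acc col),
      PySem.List.foldl_append_if]
  simp only [List.singleton_append, List.cons.injEq, true_and]
  apply List.map_congr_left
  intro c hc
  have hmemf : c ∈ fieldnames := (List.mem_filter.mp hc).1
  have hns : (!isSkipCol c) = true := (List.mem_filter.mp hc).2
  have hcols : c ∈ (PySem.List.dedup fieldnames).filter (fun c => !isSkipCol c) := by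
    exact List.mem_filter.mpr ⟨(PySem.List.mem_dedup fieldnames c).mpr hmemf, hns⟩
  rw [bTables_getD rows inc _ c (List.Nodup.filter _ (PySem.List.nodup_dedup fieldnames)) hcols]
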